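-- pv_equiv track=rewrite | github.com/costypetrisor/AoC_2018 | day_12/pb00.py | _replace_carts
-- ===== SOURCE A (Python) =====
-- import enum
--
-- @enum.unique
-- class CartDirection(enum.Enum):
--     UP = '^'
--     DOWN = 'v'
--     LEFT = '<'
--     RIGHT = '>'
--
-- def _replace_carts(grid):
--     replacement_track = {
--         CartDirection.UP: '|',
--         CartDirection.DOWN: '|',
--         CartDirection.LEFT: '-',
--         CartDirection.RIGHT: '-',
--     }
--     new_grid = []
--     for line in grid:
--         for direction in CartDirection:
--             line = line.replace(direction.value, replacement_track[direction])
--         new_grid.append(line)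
--     return new_grid
-- ===== SOURCE B (Python) =====
-- def _replace_carts(grid):
--     table = {'^': '|', 'v': '|', '<': '-', '>': '-'}
--     new_grid = []
--     for line in grid:
--         new_grid.append(''.join(table.get(ch, ch) for ch in line))
--     return new_grid
-- ===== Notes on version B (the rewrite author's own statement) =====
-- stated objective: simpler
-- what changed: Replaces the four sequential full-line str.replace passes (one per cart direction, driven by an Enum and a dict keyed by enum members) with a single character-level pass over each line through a plain char-to-char lookup table; one traversal instead of four and no enum machinery.
import Mathlib
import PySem

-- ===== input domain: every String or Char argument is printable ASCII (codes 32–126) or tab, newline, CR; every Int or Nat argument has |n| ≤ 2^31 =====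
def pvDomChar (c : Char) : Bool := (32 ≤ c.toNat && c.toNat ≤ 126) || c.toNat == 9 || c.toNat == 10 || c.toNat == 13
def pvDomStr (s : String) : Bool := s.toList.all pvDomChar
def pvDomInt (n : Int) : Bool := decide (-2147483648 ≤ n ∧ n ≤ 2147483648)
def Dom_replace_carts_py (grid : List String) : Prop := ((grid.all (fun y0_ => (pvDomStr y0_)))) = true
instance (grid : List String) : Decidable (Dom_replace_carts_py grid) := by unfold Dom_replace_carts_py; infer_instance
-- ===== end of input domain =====

-- B replaces A's four sequential per-direction str.replace passes with a single
-- character-level pass through a char lookup table (objective: simpler).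


-- ===== PORT A =====
-- the CartDirection enum in iteration order, paired with replacement_track[direction]
def cartReplacements : List (String × String) :=
  [("^", "|"), ("v", "|"), ("<", "-"), (">", "-")]

def replace_carts_py (grid : List String) : List String :=
  grid.foldl
    (fun new_grid line =>
      new_grid ++ [cartReplacements.foldl (fun l p => PySem.Str.replace l p.1 p.2) line])
    []

-- ===== PORT B =====
def cartTable : PySem.Dict Char Char := PySem.Dict.ofList [('^', '|'), ('v', '|'), ('<', '-'), ('>', '-')]

def replace_carts_py_alt (grid : List String) : List String :=
  grid.foldl
    (fun new_grid line =>
      new_grid ++ [String.ofList (line.toList.map (fun ch => PySem.Dict.getD cartTable ch ch))])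
    []

-- ===== PRECONDITION & SPEC =====
def Spec_replace_carts_py (grid : List String) (out : List String) : Prop := out = replace_carts_py_alt grid
instance (grid : List String) (out : List String) : Decidable (Spec_replace_carts_py grid out) := by unfold Spec_replace_carts_py; infer_instance

-- ===== CLAIM (what is proved, stated in full; the proofs are below) =====
def Claim_equal_replace_carts_py : Prop := ∀ (grid : List String), Dom_replace_carts_py grid → Spec_replace_carts_py grid (replace_carts_py grid)

-- ===== LEMMAS AND PROOFS =====

-- replace.go with a single-char pattern is a pointwise map, when fuel = remaining length
theorem replace_go_single (c d : Char) :
    ∀ (l acc : List Char),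
      PySem.Chars.replace.go [c] [d] l.length l acc
        = acc.reverse ++ l.map (fun x => if x = c then d else x) := by
  intro l
  induction l with
  | nil => intro acc; simp [PySem.Chars.replace.go]
  | cons h t ih =>
    intro acc
    simp only [List.length_cons, PySem.Chars.replace.go, List.isPrefixOf]
    by_cases hc : c = h
    · subst hc
      simp [ih]
    · simp [Ne.symm hc, hc, ih]

theorem replace_single (c d : Char) (s : List Char) :
    PySem.Chars.replace s [c] [d] = s.map (fun x => if x = c then d else x) := by
  simp [PySem.Chars.replace, replace_go_single]

-- one line: A's four replace passes = B's single table pass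
theorem line_eq (line : String) :
    cartReplacements.foldl (fun l p => PySem.Str.replace l p.1 p.2) line
      = String.ofList (line.toList.map (fun ch => PySem.Dict.getD cartTable ch ch)) := by
  simp only [cartReplacements, List.foldl_cons, List.foldl_nil, PySem.Str.replace]
  apply String.toList_injective
  have h1 : ("^" : String).toList = ['^'] := rfl
  have h2 : ("v" : String).toList = ['v'] := rfl
  have h3 : ("<" : String).toList = ['<'] := rfl
  have h4 : (">" : String).toList = ['>'] := rfl
  have h5 : ("|" : String).toList = ['|'] := rfl
  have h6 : ("-" : String).toList = ['-'] := rfl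
  simp only [String.toList_ofList, h1, h2, h3, h4, h5, h6, replace_single, List.map_map]
  apply List.map_congr_left
  intro x _
  have ht : cartTable = PySem.Dict.mk [('^', '|'), ('v', '|'), ('<', '-'), ('>', '-')] := by decide
  have hg : PySem.Dict.get? cartTable x =
      if x = '^' then some '|' else if x = 'v' then some '|'
      else if x = '<' then some '-' else if x = '>' then some '-' else none := by
    rw [ht]
    simp only [PySem.Dict.get?_mk_cons, beq_iff_eq]
    split_ifs <;> first | rfl | (subst_vars; simp_all)
  simp only [Function.comp, PySem.Dict.getD, hg]
  split_ifs <;> first | rfl | (subst_vars; simp_all)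

-- ===== VERDICT (by name: the statement is the Claim_ definition above) =====
theorem replace_carts_py_spec : Claim_equal_replace_carts_py := by
  intro grid _
  unfold Spec_replace_carts_py replace_carts_py replace_carts_py_alt
  have hf : (fun (new_grid : List String) (line : String) =>
      new_grid ++ [cartReplacements.foldl (fun l p => PySem.Str.replace l p.1 p.2) line])
    = (fun (new_grid : List String) (line : String) =>
      new_grid ++ [String.ofList (line.toList.map (fun ch => PySem.Dict.getD cartTable ch ch))]) := by
    funext new_grid line
    rw [line_eq]
  rw [hf]
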